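-- pv_equiv track=rewrite | github.com/salmedina/InMind_Email | Server/extractor.py | findToEnd
-- ===== SOURCE A (Python) =====
-- def findToEnd(line,text,lineno):
-- 	i = lineno + 1
-- 	re_index = 0
-- 	while i < len(text):
-- 		if "Subject:" in text[i]:
-- 			return i
-- 		if "X-Mailer" in text[i]:
-- 			return i
-- 		if (re_index == 0) and ("Re:" in text[i]):
-- 			re_index = i
-- 		i += 1
-- 	if re_index != 0:
-- 		return re_index
-- 	return lineno + 1
-- ===== SOURCE B (Python) =====
-- def findToEnd(line, text, lineno):
--     # pass 1: first terminator line
--     for i in range(lineno + 1, len(text)):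
--         if "Subject:" in text[i] or "X-Mailer" in text[i]:
--             return i
--     # pass 2: first "Re:" line (only relevant when no terminator exists)
--     for i in range(lineno + 1, len(text)):
--         if "Re:" in text[i]:
--             return i
--     return lineno + 1
-- ===== Notes on version B (the rewrite author's own statement) =====
-- stated objective: simpler
-- what changed: A's single interleaved while-loop carrying a re_index==0 sentinel is replaced by two sequential first-match scans: first for a 'Subject:'/'X-Mailer' terminator line, then for the first 'Re:' line.
-- intended difference: When no 'Subject:'/'X-Mailer' line occurs in the scanned range and the first 'Re:' line there is line index 0 (reachable only with lineno <= -1), A's re_index==0 sentinel ignores it and A returns a later 'Re:' index or lineno+1, while B returns 0, the first matching line, which is what the search intends. — e.g. on findToEnd("", ["Re: a", "Re: b"], -1): A returns 1, B returns 0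
import Mathlib
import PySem

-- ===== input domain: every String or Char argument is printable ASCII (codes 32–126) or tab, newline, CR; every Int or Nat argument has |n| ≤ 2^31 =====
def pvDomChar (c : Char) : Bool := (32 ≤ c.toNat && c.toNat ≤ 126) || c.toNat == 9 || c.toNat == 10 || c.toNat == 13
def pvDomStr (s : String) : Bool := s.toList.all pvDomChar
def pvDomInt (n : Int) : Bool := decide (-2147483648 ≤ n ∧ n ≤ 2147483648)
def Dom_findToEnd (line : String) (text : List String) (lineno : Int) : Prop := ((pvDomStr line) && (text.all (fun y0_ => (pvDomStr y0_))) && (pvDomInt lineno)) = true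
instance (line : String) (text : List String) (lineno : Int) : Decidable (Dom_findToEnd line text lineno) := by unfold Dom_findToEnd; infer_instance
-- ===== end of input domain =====

-- B replaces A's interleaved while-loop with re_index sentinel by two sequential first-match
-- scans (objective: simpler); B intentionally returns line 0 where A's sentinel skips it (see D_).

-- ===== PORT A =====
-- text[i] with Python negative indexing; the IndexError case (excluded by Pre_) maps to ""
def pvLine (text : List String) (i : Int) : String := (PySem.List.pyGet? text i).getD ""

-- Python's '"sub" in text[i]' (used by both ports and by D_)
def pvHas (text : List String) (i : Int) (sub : String) : Bool := PySem.Str.isIn sub (pvLine text i)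

def pvSubject : String := "Subject:"
def pvXMailer : String := "X-Mailer"
def pvReStr : String := "Re:"

-- the while-loop; fuel = number of remaining iterations ((len(text) - i).toNat), so
-- fuel = 0 exactly when the loop condition i < len(text) fails
def findToEndLoop (text : List String) (lineno : Int) : Nat → Int → Int → Int
  | 0, _i, re_index => if re_index ≠ 0 then re_index else lineno + 1
  | f + 1, i, re_index =>
    if pvHas text i pvSubject then i
    else if pvHas text i pvXMailer then i
    else if re_index == 0 && pvHas text i pvReStr then
      findToEndLoop text lineno f (i + 1) i
    else
      findToEndLoop text lineno f (i + 1) re_index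

def findToEnd (line : String) (text : List String) (lineno : Int) : Int :=
  findToEndLoop text lineno ((text.length : Int) - (lineno + 1)).toNat (lineno + 1) 0

-- ===== PORT B =====
-- the early-return for-loop of Source B: first index in idxs whose line satisfies p
def pvFirst (p : Int → Bool) : List Int → Option Int
  | [] => none
  | i :: rest => if p i then some i else pvFirst p rest

def pvTerm (text : List String) (i : Int) : Bool :=
  pvHas text i pvSubject || pvHas text i pvXMailer

def pvRe (text : List String) (i : Int) : Bool := pvHas text i pvReStr

def findToEnd_alt (line : String) (text : List String) (lineno : Int) : Int :=
  let idxs := PySem.List.pyRange (lineno + 1) (text.length : Int) 1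
  match pvFirst (pvTerm text) idxs with
  | some i => i
  | none =>
    match pvFirst (pvRe text) idxs with
    | some i => i
    | none => lineno + 1

-- ===== PRECONDITION & SPEC =====
-- Pre_ excludes exactly the inputs where A (and B) raise IndexError: the first loop index
-- lineno+1 below -len(text).
def Pre_findToEnd (line : String) (text : List String) (lineno : Int) : Prop :=
  -(text.length : Int) ≤ lineno + 1
instance (line : String) (text : List String) (lineno : Int) : Decidable (Pre_findToEnd line text lineno) := by unfold Pre_findToEnd; infer_instance

def pvWitness_findToEnd : String × List String × Int := ("", ["a"], 0)

-- When no "Subject:"/"X-Mailer" line follows and the first "Re:" line in the scanned range is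
-- line 0 (reachable only with lineno ≤ -1), A's re_index==0 sentinel ignores it and A returns a
-- later "Re:" index or lineno+1, while B returns 0 — the first matching line, which is what the
-- search describes.
def D_findToEnd (line : String) (text : List String) (lineno : Int) : Prop :=
  let r := PySem.List.pyRange (lineno + 1) text.length 1
  let re := r.filter (pvHas text · pvReStr)
  0 ≤ text.length + lineno + 1 ∧
  (∀ i ∈ r, (pvHas text i pvSubject || pvHas text i pvXMailer) = false) ∧
  re.head? = some 0 ∧ (lineno < -1 ∨ 2 ≤ re.length)
instance (line : String) (text : List String) (lineno : Int) : Decidable (D_findToEnd line text lineno) := by unfold D_findToEnd; infer_instance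

def Spec_findToEnd (line : String) (text : List String) (lineno : Int) (out : Int) : Prop :=
  ¬ D_findToEnd line text lineno → out = findToEnd_alt line text lineno
instance (line : String) (text : List String) (lineno : Int) (out : Int) : Decidable (Spec_findToEnd line text lineno out) := by unfold Spec_findToEnd; infer_instance

def pvDiffWitness_findToEnd : String × List String × Int := ("", ["Re: a", "Re: b"], -1)
def pvDiffWitnessOut_findToEnd : Int × Int := (1, 0)

-- ===== CLAIM (what is proved, stated in full; the proofs are below) =====
def Claim_unchanged_findToEnd : Prop := ∀ (line : String) (text : List String) (lineno : Int), Dom_findToEnd line text lineno → Pre_findToEnd line text lineno → Spec_findToEnd line text lineno (findToEnd line text lineno)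
def Claim_changed_findToEnd : Prop := Dom_findToEnd (pvDiffWitness_findToEnd.1) (pvDiffWitness_findToEnd.2.1) (pvDiffWitness_findToEnd.2.2) ∧ Pre_findToEnd (pvDiffWitness_findToEnd.1) (pvDiffWitness_findToEnd.2.1) (pvDiffWitness_findToEnd.2.2) ∧ D_findToEnd (pvDiffWitness_findToEnd.1) (pvDiffWitness_findToEnd.2.1) (pvDiffWitness_findToEnd.2.2) ∧ findToEnd (pvDiffWitness_findToEnd.1) (pvDiffWitness_findToEnd.2.1) (pvDiffWitness_findToEnd.2.2) = pvDiffWitnessOut_findToEnd.1 ∧ findToEnd_alt (pvDiffWitness_findToEnd.1) (pvDiffWitness_findToEnd.2.1) (pvDiffWitness_findToEnd.2.2) = pvDiffWitnessOut_findToEnd.2 ∧ pvDiffWitnessOut_findToEnd.1 ≠ pvDiffWitnessOut_findToEnd.2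
def Claim_exact_findToEnd : Prop := ∀ (line : String) (text : List String) (lineno : Int), Dom_findToEnd line text lineno → Pre_findToEnd line text lineno → D_findToEnd line text lineno → findToEnd line text lineno ≠ findToEnd_alt line text lineno

-- ===== LEMMAS AND PROOFS =====

-- A-side proof helper: A's recorded re_index is the first "Re:" index that is not 0
def pvRe2 (text : List String) (i : Int) : Bool := pvRe text i && !(i == 0)

theorem pvFirst_eq_none_iff (p : Int → Bool) (l : List Int) :
    pvFirst p l = none ↔ ∀ x ∈ l, p x = false := by
  induction l with
  | nil => simp [pvFirst]
  | cons a t ih =>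
    by_cases hp : p a = true <;> simp [pvFirst, hp, ih]

theorem pvFirst_some (p : Int → Bool) (l : List Int) (j : Int)
    (h : pvFirst p l = some j) : j ∈ l ∧ p j = true := by
  induction l with
  | nil => simp [pvFirst] at h
  | cons a t ih =>
    by_cases hp : p a = true
    · simp [pvFirst, hp] at h; subst h; exact ⟨List.mem_cons_self, hp⟩
    · simp [pvFirst, hp] at h
      rcases ih h with ⟨h1, h2⟩
      exact ⟨List.mem_cons_of_mem _ h1, h2⟩

theorem pvFirst_eq_head_filter (p : Int → Bool) (l : List Int) :
    pvFirst p l = (l.filter p).head? := by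
  induction l with
  | nil => simp [pvFirst]
  | cons a t ih =>
    by_cases hp : p a = true <;> simp [pvFirst, hp, ih]

theorem pvFirst_range_first (p : Int → Bool) (n : Int) : ∀ (f : Nat) (i j : Int),
    (n - i).toNat = f → pvFirst p (PySem.List.pyRange i n 1) = some j →
    ∀ k, i ≤ k → k < j → p k = false := by
  intro f
  induction f with
  | zero =>
    intro i j hf hs
    rw [PySem.List.pyRange_one_eq_nil (by omega)] at hs
    simp [pvFirst] at hs
  | succ f ih =>
    intro i j hf hs k hk1 hk2
    have hin : i < n := by
      by_contra hni
      rw [PySem.List.pyRange_one_eq_nil (by omega)] at hs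
      simp [pvFirst] at hs
    rw [PySem.List.pyRange_one_cons hin] at hs
    by_cases hp : p i = true
    · simp [pvFirst, hp] at hs; omega
    · simp [pvFirst, hp] at hs
      rcases eq_or_lt_of_le hk1 with h | h
      · subst h; simpa using hp
      · exact ih (i + 1) j (by omega) hs k (by omega) hk2

-- relation between A's skip-0 first "Re:" scan and B's plain first "Re:" scan
theorem pvRe2_vs_pvRe (text : List String) : ∀ (f : Nat) (i : Int),
    ((text.length : Int) - i).toNat = f →
    pvFirst (pvRe2 text) (PySem.List.pyRange i (text.length : Int) 1) =
      match pvFirst (pvRe text) (PySem.List.pyRange i (text.length : Int) 1) with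
      | none => none
      | some j => if j = 0 then pvFirst (pvRe text) (PySem.List.pyRange 1 (text.length : Int) 1)
                  else some j := by
  intro f
  induction f with
  | zero =>
    intro i hf
    rw [PySem.List.pyRange_one_eq_nil (by omega)]
    simp [pvFirst]
  | succ f ih =>
    intro i hf
    have hin : i < (text.length : Int) := by omega
    rw [PySem.List.pyRange_one_cons hin]
    by_cases hre : pvRe text i = true
    · by_cases h0 : i = 0
      · subst h0
        have h2 : pvRe2 text 0 = false := by simp [pvRe2]
        simp [pvFirst, hre, h2]
        rw [ih 1 (by omega)]
        cases hR : pvFirst (pvRe text) (PySem.List.pyRange 1 (text.length : Int) 1) with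
        | none => simp
        | some j =>
          have hj : (1 : Int) ≤ j := by
            have := (pvFirst_some _ _ _ hR).1
            rw [PySem.List.mem_pyRange_one] at this
            omega
          simp [show j ≠ 0 by omega]
      · have h2 : pvRe2 text i = true := by simp [pvRe2, hre, h0]
        simp [pvFirst, h2, hre, h0]
    · have h2 : pvRe2 text i = false := by simp [pvRe2, hre]
      simp [pvFirst, h2, hre]
      exact ih (i + 1) (by omega)

-- characterisation of A's loop by the two scans
theorem findToEndLoop_eq (text : List String) (lineno : Int) : ∀ (f : Nat) (i r : Int),
    ((text.length : Int) - i).toNat = f →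
    findToEndLoop text lineno f i r =
      match pvFirst (pvTerm text) (PySem.List.pyRange i (text.length : Int) 1) with
      | some t => t
      | none =>
        if r ≠ 0 then r
        else match pvFirst (pvRe2 text) (PySem.List.pyRange i (text.length : Int) 1) with
             | some j => j
             | none => lineno + 1 := by
  intro f
  induction f with
  | zero =>
    intro i r hf
    rw [PySem.List.pyRange_one_eq_nil (by omega)]
    simp [findToEndLoop, pvFirst]
  | succ f ih =>
    intro i r hf
    have hin : i < (text.length : Int) := by omega
    rw [PySem.List.pyRange_one_cons hin]
    cases hS : pvHas text i pvSubject with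
    | true =>
      have hT : pvTerm text i = true := by simp only [pvTerm, hS, Bool.true_or]
      simp only [findToEndLoop, hS, if_true, pvFirst, hT]
    | false =>
      cases hX : pvHas text i pvXMailer with
      | true =>
        have hT : pvTerm text i = true := by simp only [pvTerm, hS, hX, Bool.false_or]
        simp only [findToEndLoop, hS, hX, Bool.false_eq_true, if_false, if_true, pvFirst, hT]
      | false =>
        have hT : pvTerm text i = false := by simp only [pvTerm, hS, hX, Bool.or_self]
        simp only [findToEndLoop, hS, hX, Bool.false_eq_true, if_false, pvFirst, hT]
        by_cases hr0 : r = 0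
        · subst hr0
          cases hRe : pvHas text i pvReStr with
          | true =>
            have hre : pvRe text i = true := hRe
            simp only [BEq.rfl, Bool.and_true, if_true]
            rw [ih (i + 1) i (by omega)]
            cases hPT : pvFirst (pvTerm text) (PySem.List.pyRange (i + 1) (text.length : Int) 1) with
            | some t => simp
            | none =>
              simp only
              by_cases h0 : i = 0
              · subst h0
                have h2 : pvRe2 text 0 = false := by simp [pvRe2]
                simp [h2]
              · have h2 : pvRe2 text i = true := by
                  unfold pvRe2; rw [hre]; simp [h0]
                simp [h2, h0]
          | false =>
            simp only [Bool.and_false, Bool.false_eq_true, if_false]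
            rw [ih (i + 1) 0 (by omega)]
            have hre : pvRe text i = false := hRe
            have h2 : pvRe2 text i = false := by unfold pvRe2; rw [hre]; simp
            cases hPT : pvFirst (pvTerm text) (PySem.List.pyRange (i + 1) (text.length : Int) 1) with
            | some t => simp
            | none => simp [h2]
        · have hbeq : (r == (0 : Int)) = false := by simpa using hr0
          simp only [hbeq, Bool.false_and, Bool.false_eq_true, if_false]
          rw [ih (i + 1) r (by omega)]
          cases hPT : pvFirst (pvTerm text) (PySem.List.pyRange (i + 1) (text.length : Int) 1) with
          | some t => simp
          | none => simp [hr0]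

-- ===== VERDICT (by name: the statement is the Claim_ definition above) =====
theorem findToEnd_spec : Claim_unchanged_findToEnd := by
  intro line text lineno _hdom hpre
  unfold Spec_findToEnd
  intro hnD
  simp only [findToEnd, findToEnd_alt]
  rw [findToEndLoop_eq text lineno ((text.length : Int) - (lineno + 1)).toNat (lineno + 1) 0 rfl]
  rw [pvRe2_vs_pvRe text ((text.length : Int) - (lineno + 1)).toNat (lineno + 1) rfl]
  cases hT : pvFirst (pvTerm text) (PySem.List.pyRange (lineno + 1) (text.length : Int) 1) with
  | some t => simp
  | none =>
    simp only
    cases hR : pvFirst (pvRe text) (PySem.List.pyRange (lineno + 1) (text.length : Int) 1) with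
    | none => simp
    | some j =>
      by_cases hj : j = 0
      · subst hj
        -- A's sentinel case: derive the D_ conjuncts; ¬D_ forces lineno+1 = 0 and no later "Re:"
        obtain ⟨hmem, hp0⟩ := pvFirst_some _ _ _ hR
        rw [PySem.List.mem_pyRange_one] at hmem
        have hc3 := (pvFirst_eq_none_iff _ _).1 hT
        have hhead : ((PySem.List.pyRange (lineno + 1) (text.length : Int) 1).filter
            (pvRe text)).head? = some 0 := by
          rw [← pvFirst_eq_head_filter]
          exact hR
        have hndis : ¬ (lineno < -1 ∨
            2 ≤ ((PySem.List.pyRange (lineno + 1) (text.length : Int) 1).filter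
              (pvRe text)).length) := by
          intro hdis
          have hg : (0 : Int) ≤ text.length + lineno + 1 := by
            have h := hpre
            unfold Pre_findToEnd at h
            omega
          exact hnD ⟨hg, hc3, hhead, hdis⟩
        rw [not_or] at hndis
        obtain ⟨hndis1, hndis2⟩ := hndis
        have hs0 : lineno + 1 = 0 := by omega
        have hsplit : PySem.List.pyRange (lineno + 1) (text.length : Int) 1 =
            (0 : Int) :: PySem.List.pyRange 1 (text.length : Int) 1 := by
          rw [hs0]
          exact PySem.List.pyRange_one_cons (by omega)
        have hnone : pvFirst (pvRe text) (PySem.List.pyRange 1 (text.length : Int) 1) = none := by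
          rw [pvFirst_eq_head_filter]
          rw [hsplit] at hndis2
          cases hfil : (PySem.List.pyRange 1 (text.length : Int) 1).filter (pvRe text) with
          | nil => rfl
          | cons b bt =>
            exfalso
            apply hndis2
            rw [List.filter_cons, if_pos hp0, hfil]
            simp
        simp [hnone, hs0]
      · simp [hj]

theorem findToEnd_changed : Claim_changed_findToEnd := by
  unfold Claim_changed_findToEnd; decide

theorem findToEnd_tight : Claim_exact_findToEnd := by
  intro line text lineno _hdom _hpre hD
  dsimp only [D_findToEnd] at hD
  obtain ⟨hpre2, h3, hhead, hdis⟩ := hD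
  rw [← pvFirst_eq_head_filter] at hhead
  have hR : pvFirst (pvRe text) (PySem.List.pyRange (lineno + 1) (text.length : Int) 1) = some 0 :=
    hhead
  obtain ⟨hmem, hp0⟩ := pvFirst_some _ _ _ hR
  rw [PySem.List.mem_pyRange_one] at hmem
  have hfirst := pvFirst_range_first (pvRe text) (text.length : Int) _ (lineno + 1) 0 rfl hR
  simp only [findToEnd, findToEnd_alt]
  rw [findToEndLoop_eq text lineno ((text.length : Int) - (lineno + 1)).toNat (lineno + 1) 0 rfl]
  rw [pvRe2_vs_pvRe text ((text.length : Int) - (lineno + 1)).toNat (lineno + 1) rfl]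
  have hT : pvFirst (pvTerm text) (PySem.List.pyRange (lineno + 1) (text.length : Int) 1) = none :=
    (pvFirst_eq_none_iff _ _).2 h3
  simp only [hT, hR]
  cases hR1 : pvFirst (pvRe text) (PySem.List.pyRange 1 (text.length : Int) 1) with
  | some j =>
    obtain ⟨hmem1, _⟩ := pvFirst_some _ _ _ hR1
    rw [PySem.List.mem_pyRange_one] at hmem1
    simp
    omega
  | none =>
    simp
    rcases hdis with h | hlen
    · omega
    · exfalso
      -- the filtered "Re:" list is exactly [0], contradicting 2 ≤ its length
      rw [pvFirst_eq_head_filter] at hR1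
      have hfil1 : (PySem.List.pyRange 1 (text.length : Int) 1).filter (pvRe text) = [] := by
        cases hf : (PySem.List.pyRange 1 (text.length : Int) 1).filter (pvRe text) with
        | nil => rfl
        | cons b bt => rw [hf] at hR1; simp at hR1
      have hsplit : PySem.List.pyRange (lineno + 1) (text.length : Int) 1 =
          PySem.List.pyRange (lineno + 1) 0 1 ++ ((0 : Int) :: PySem.List.pyRange 1 (text.length : Int) 1) := by
        rw [PySem.List.pyRange_one_append (lineno + 1) 0 (text.length : Int) hmem.1 (by omega),
            PySem.List.pyRange_one_cons (show (0:Int) < (text.length : Int) by omega)]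
        norm_num
      have hfil0 : (PySem.List.pyRange (lineno + 1) 0 1).filter (pvRe text) = [] := by
        rw [List.filter_eq_nil_iff]
        intro a ha
        rw [PySem.List.mem_pyRange_one] at ha
        simp [hfirst a ha.1 ha.2]
      have hlen2 : 2 ≤ ((PySem.List.pyRange (lineno + 1) (text.length : Int) 1).filter
          (pvRe text)).length := hlen
      rw [hsplit, List.filter_append, hfil0, List.filter_cons, if_pos hp0, hfil1] at hlen2
      simp at hlen2
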